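-- pv_equiv track=rewrite | github.com/Ryder-MHumble/Nexus | app/services/core/custom_fields.py | merge_custom_fields
-- ===== SOURCE A (Python) =====
-- def merge_custom_fields(
--     existing: dict[str, str], incoming: dict[str, str | None],
-- ) -> dict[str, str]:
--     """Shallow-merge custom fields: incoming keys override, null values delete.
--
--     Args:
--         existing: Current custom_fields from DB (or {}).
--         incoming: User-provided updates. Keys with None value are deleted.
--
--     Returns:
--         Merged dict with null-valued keys removed.
--     """
--     merged = {**existing}
--     for k, v in incoming.items():
--         if v is None:
--             merged.pop(k, None)
--         else:
--             merged[k] = v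
--     return merged
-- ===== SOURCE B (Python) =====
-- def merge_custom_fields(
--     existing: dict[str, str], incoming: dict[str, str | None],
-- ) -> dict[str, str]:
--     """Lookup-join: scan existing once joining each key against incoming,
--     then append the genuinely new non-None incoming entries."""
--     kept = []
--     for k, v in existing.items():
--         if k not in incoming:
--             kept.append((k, v))
--         elif incoming[k] is not None:
--             kept.append((k, incoming[k]))
--     added = [(k, v) for k, v in incoming.items() if v is not None and k not in existing]
--     return dict(kept + added)
-- ===== Notes on version B (the rewrite author's own statement) =====
-- stated objective: alternative
-- what changed: A copies existing and mutates it key-by-key while iterating incoming (pop on None, assign otherwise); B never mutates: it scans existing once, joining each key against incoming by lookup, then appends the genuinely new non-None incoming entries, and returns the concatenation as a dict.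
import Mathlib
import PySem

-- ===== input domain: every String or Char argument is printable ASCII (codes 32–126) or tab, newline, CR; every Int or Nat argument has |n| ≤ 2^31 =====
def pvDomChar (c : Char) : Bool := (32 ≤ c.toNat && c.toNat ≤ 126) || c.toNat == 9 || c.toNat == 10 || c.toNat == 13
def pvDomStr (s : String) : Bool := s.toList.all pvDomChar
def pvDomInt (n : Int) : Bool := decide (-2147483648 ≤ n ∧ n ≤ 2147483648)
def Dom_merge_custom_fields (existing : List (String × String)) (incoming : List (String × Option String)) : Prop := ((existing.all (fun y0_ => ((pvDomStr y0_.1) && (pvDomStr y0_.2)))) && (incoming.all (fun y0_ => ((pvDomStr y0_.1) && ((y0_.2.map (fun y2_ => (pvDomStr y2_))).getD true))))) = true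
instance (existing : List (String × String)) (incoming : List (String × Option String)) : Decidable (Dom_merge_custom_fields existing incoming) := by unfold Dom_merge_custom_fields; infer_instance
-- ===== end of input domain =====

-- B replaces A's copy-then-mutate loop by a non-mutating lookup-join: scan existing joining
-- each key against incoming, then append the genuinely new non-None incoming entries (objective: alternative).

-- ===== PORT A =====
def merge_custom_fields (existing : List (String × String)) (incoming : List (String × Option String)) : List (String × String) :=
  (incoming.foldl (fun m p =>
      match p.2 with
      | none => m.erase p.1
      | some v => m.insert p.1 v) (PySem.Dict.ofList existing)).items

-- ===== PORT B =====
def merge_custom_fields_alt (existing : List (String × String)) (incoming : List (String × Option String)) : List (String × String) :=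
  let incD := PySem.Dict.ofList incoming
  let exD := PySem.Dict.ofList existing
  let kept := existing.filterMap (fun p =>
    match incD.get? p.1 with
    | none => some p
    | some none => none
    | some (some w) => some (p.1, w))
  let added := incoming.filterMap (fun q =>
    match q.2 with
    | none => none
    | some w => if exD.contains q.1 then none else some (q.1, w))
  (PySem.Dict.ofList (kept ++ added)).items

-- ===== PRECONDITION & SPEC =====
-- Pre_ requires both association lists to have pairwise-distinct keys: they represent Python
-- dicts (whose keys are always unique), so no input of A is excluded.
def Pre_merge_custom_fields (existing : List (String × String)) (incoming : List (String × Option String)) : Prop :=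
  (existing.map Prod.fst).Nodup ∧ (incoming.map Prod.fst).Nodup
instance (existing : List (String × String)) (incoming : List (String × Option String)) : Decidable (Pre_merge_custom_fields existing incoming) := by unfold Pre_merge_custom_fields; infer_instance

def pvWitness_merge_custom_fields : (List (String × String)) × (List (String × Option String)) :=
  ([("a", "1"), ("b", "2")], [("b", none), ("c", some "3")])

def Spec_merge_custom_fields (existing : List (String × String)) (incoming : List (String × Option String)) (out : List (String × String)) : Prop := out = merge_custom_fields_alt existing incoming
instance (existing : List (String × String)) (incoming : List (String × Option String)) (out : List (String × String)) : Decidable (Spec_merge_custom_fields existing incoming out) := by unfold Spec_merge_custom_fields; infer_instance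

-- ===== CLAIM (what is proved, stated in full; the proofs are below) =====
def Claim_equal_merge_custom_fields : Prop := ∀ (existing : List (String × String)) (incoming : List (String × Option String)), Dom_merge_custom_fields existing incoming → Pre_merge_custom_fields existing incoming → Spec_merge_custom_fields existing incoming (merge_custom_fields existing incoming)

-- ===== LEMMAS AND PROOFS =====

-- first-match lookup in an association list (what Dict.get? computes on its items)
def pvLook (t : List (String × Option String)) (k : String) : Option (Option String) :=
  (t.find? (fun q => q.1 == k)).map (·.2)

-- B's join decision for one existing entry
def pvSel (t : List (String × Option String)) (p : String × String) : Option (String × String) :=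
  match pvLook t p.1 with
  | none => some p
  | some none => none
  | some (some w) => some (p.1, w)

-- B's join pass, as a function of the two item lists
def pvJoin (t : List (String × Option String)) (L : List (String × String)) : List (String × String) :=
  L.filterMap (pvSel t)

-- B's append pass, as a function of the two item lists
def pvAdded (t : List (String × Option String)) (L : List (String × String)) : List (String × String) :=
  t.filterMap (fun q =>
    match q.2 with
    | none => none
    | some w => if L.any (fun p => p.1 == q.1) then none else some (q.1, w))

theorem pvOfList_items {ν : Type} (l : List (String × ν)) (h : (l.map Prod.fst).Nodup) :
    (PySem.Dict.ofList l).items = l := by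
  have := PySem.Dict.items_foldl_insert_fresh (l := l) (k := Prod.fst) (v := Prod.snd)
    (d := PySem.Dict.empty) (by intro a _; simp) h
  simpa [PySem.Dict.ofList, PySem.Dict.update, PySem.Dict.empty] using this

theorem pvLook_cons (k : String) (v : Option String) (t : List (String × Option String)) (x : String) :
    pvLook ((k, v) :: t) x = if (k == x) then some v else pvLook t x := by
  by_cases h : (k == x) = true
  · simp [pvLook, List.find?, h]
  · simp only [Bool.not_eq_true] at h
    simp [pvLook, List.find?, h]

theorem pvLook_eq_none_of_not_mem {t : List (String × Option String)} {k : String}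
    (h : k ∉ t.map Prod.fst) : pvLook t k = none := by
  have hf : t.find? (fun q => q.1 == k) = none := by
    rw [List.find?_eq_none]
    intro q hq hbe
    have : q.1 = k := by simpa using hbe
    exact h (this ▸ List.mem_map_of_mem (f := Prod.fst) hq)
  simp [pvLook, hf]

theorem pvSel_cons (k : String) (v : Option String) (t : List (String × Option String)) (p : String × String) :
    pvSel ((k, v) :: t) p =
      if (p.1 == k) then (match v with | none => none | some w => some (p.1, w)) else pvSel t p := by
  unfold pvSel
  rw [pvLook_cons]
  by_cases h : p.1 = k
  · cases v <;> simp [h]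
  · simp [h, Ne.symm h]

theorem pvJoin_nil (L : List (String × String)) : pvJoin [] L = L := by
  simp [pvJoin, pvSel, pvLook]

theorem pvJoin_cons_none (k : String) (t : List (String × Option String)) (L : List (String × String)) :
    pvJoin ((k, none) :: t) L = pvJoin t (L.filter (fun p => !(p.1 == k))) := by
  unfold pvJoin
  rw [List.filterMap_filter]
  apply List.filterMap_congr
  intro p _
  by_cases h : (p.1 == k) = true
  · simp [pvSel_cons, h]
  · simp only [Bool.not_eq_true] at h
    simp [pvSel_cons, h]

theorem pvJoin_cons_some_repl (k w : String) (t : List (String × Option String)) (L : List (String × String))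
    (hk : pvLook t k = none) :
    pvJoin ((k, some w) :: t) L = pvJoin t (L.map (fun p => if (p.1 == k) then (k, w) else p)) := by
  unfold pvJoin
  rw [List.filterMap_map]
  apply List.filterMap_congr
  intro p _
  by_cases h : (p.1 == k) = true
  · have hp : p.1 = k := by simpa using h
    rw [pvSel_cons]
    simp only [h, if_true, Function.comp]
    simp [hp, pvSel, hk]
  · simp only [Bool.not_eq_true] at h
    simp [pvSel_cons, h, Function.comp]

theorem pvJoin_cons_some_fresh (k w : String) (t : List (String × Option String)) (L : List (String × String))
    (hd : L.any (fun p => p.1 == k) = false) :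
    pvJoin ((k, some w) :: t) L = pvJoin t L := by
  unfold pvJoin
  apply List.filterMap_congr
  intro p hp
  have h : (p.1 == k) = false := by
    rw [List.any_eq_false] at hd
    simpa using hd p hp
  simp [pvSel_cons, h]

theorem pvJoin_append (t : List (String × Option String)) (L L' : List (String × String)) :
    pvJoin t (L ++ L') = pvJoin t L ++ pvJoin t L' := List.filterMap_append

theorem pvJoin_singleton_fresh (t : List (String × Option String)) (k w : String)
    (hk : pvLook t k = none) : pvJoin t [(k, w)] = [(k, w)] := by
  simp [pvJoin, pvSel, hk]

theorem pvAdded_congr (t : List (String × Option String)) (L L' : List (String × String))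
    (h : ∀ q ∈ t, L'.any (fun p => p.1 == q.1) = L.any (fun p => p.1 == q.1)) :
    pvAdded t L' = pvAdded t L := by
  unfold pvAdded
  apply List.filterMap_congr
  intro q hq
  rw [h q hq]

theorem pvAny_filter_ne (L : List (String × String)) (k x : String) (hx : x ≠ k) :
    (L.filter (fun p => !(p.1 == k))).any (fun p => p.1 == x) = L.any (fun p => p.1 == x) := by
  rw [List.any_filter]
  apply List.any_congr rfl
  intro p
  by_cases h : (p.1 == x) = true
  · have hp : p.1 = x := by simpa using h
    have : (p.1 == k) = false := by simp [hp, hx]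
    simp [this, h]
  · simp only [Bool.not_eq_true] at h
    simp [h]

theorem pvAny_map_repl (L : List (String × String)) (k w x : String) :
    (L.map (fun p => if (p.1 == k) then (k, w) else p)).any (fun p => p.1 == x) =
      L.any (fun p => p.1 == x) := by
  rw [List.any_map]
  apply List.any_congr rfl
  intro p
  by_cases h : (p.1 == k) = true
  · have hp : p.1 = k := by simpa using h
    simp [Function.comp, h, hp]
  · simp only [Bool.not_eq_true] at h
    simp [Function.comp, h]

theorem pvAny_append_ne (L : List (String × String)) (k w x : String) (hx : x ≠ k) :
    (L ++ [(k, w)]).any (fun p => p.1 == x) = L.any (fun p => p.1 == x) := by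
  simp [List.any_append, Ne.symm hx]

-- main loop invariant: A's fold over incoming computes join ++ added on the item lists
theorem pvLoop (inc : List (String × Option String)) (d : PySem.Dict String String)
    (hnd : (inc.map Prod.fst).Nodup) :
    (inc.foldl (fun m p =>
        match p.2 with
        | none => m.erase p.1
        | some v => m.insert p.1 v) d).items = pvJoin inc d.items ++ pvAdded inc d.items := by
  induction inc generalizing d with
  | nil => simp [pvJoin_nil, pvAdded]
  | cons q t ih =>
    rcases q with ⟨k, v?⟩
    rw [List.map_cons, List.nodup_cons] at hnd
    have hkt : pvLook t k = none := pvLook_eq_none_of_not_mem hnd.1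
    have hmem : ∀ r ∈ t, r.1 ≠ k := by
      intro r hr he
      have hm : r.1 ∈ List.map Prod.fst t := List.mem_map_of_mem hr
      exact hnd.1 (he ▸ hm)
    cases v? with
    | none =>
      simp only [List.foldl_cons]
      rw [ih _ hnd.2]
      have hitems : (d.erase k).items = d.items.filter (fun p => !(p.1 == k)) := rfl
      rw [hitems, ← pvJoin_cons_none]
      congr 1
      rw [pvAdded_congr t d.items (d.items.filter (fun p => !(p.1 == k)))
        (fun r hr => pvAny_filter_ne _ _ _ (hmem r hr))]
      simp only [pvAdded, List.filterMap_cons]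
    | some v =>
      simp only [List.foldl_cons]
      rw [ih _ hnd.2]
      by_cases hc : d.contains k = true
      · have hitems : (d.insert k v).items = d.items.map (fun p => if (p.1 == k) then (k, v) else p) := by
          simp [PySem.Dict.insert, hc]
        rw [hitems, ← pvJoin_cons_some_repl _ _ _ _ hkt]
        congr 1
        rw [pvAdded_congr t _ _ (fun r _ => pvAny_map_repl d.items k v r.1)]
        have h2 : d.items.any (fun p => p.1 == k) = true := hc
        simp only [pvAdded, List.filterMap_cons, h2, if_true]
      · have hc' : d.contains k = false := by simpa using hc
        have hitems : (d.insert k v).items = d.items ++ [(k, v)] := by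
          simp [PySem.Dict.insert, hc']
        rw [hitems, pvJoin_append, pvJoin_singleton_fresh _ _ _ hkt]
        rw [pvAdded_congr t _ _ (fun r hr => pvAny_append_ne d.items k v r.1 (hmem r hr))]
        have h2 : d.items.any (fun p => p.1 == k) = false := hc'
        rw [pvJoin_cons_some_fresh _ _ _ _ h2]
        simp [pvAdded, h2]

theorem pvJoin_keys_sublist (t : List (String × Option String)) (L : List (String × String)) :
    ((pvJoin t L).map Prod.fst).Sublist (L.map Prod.fst) := by
  induction L with
  | nil => simp [pvJoin]
  | cons p L ih =>
    simp only [pvJoin, List.filterMap_cons, List.map_cons] at *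
    cases hl : pvSel t p with
    | none => exact List.Sublist.cons _ ih
    | some r =>
      have hr : r.1 = p.1 := by
        unfold pvSel at hl
        cases h : pvLook t p.1 <;> rw [h] at hl
        · simp at hl; simp [← hl]
        · rename_i v
          cases v with
          | none => simp at hl
          | some w => simp at hl; simp [← hl]
      simp only [List.map_cons, hr]
      exact List.Sublist.cons₂ _ ih

theorem pvAdded_keys_sublist (t : List (String × Option String)) (L : List (String × String)) :
    ((pvAdded t L).map Prod.fst).Sublist (t.map Prod.fst) := by
  induction t with
  | nil => simp [pvAdded]
  | cons q t ih =>
    cases hv : q.2 with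
    | none =>
      simp only [pvAdded, List.filterMap_cons, hv, List.map_cons]
      exact List.Sublist.cons _ ih
    | some w =>
      by_cases hcon : (L.any fun p => p.1 == q.1) = true
      · simp only [pvAdded, List.filterMap_cons, hv, hcon, if_true, List.map_cons]
        exact List.Sublist.cons _ ih
      · have hcon' : (L.any fun p => p.1 == q.1) = false := Bool.eq_false_iff.mpr hcon
        simp only [pvAdded, List.filterMap_cons, hv, hcon', Bool.false_eq_true, if_false,
          List.map_cons]
        exact List.Sublist.cons₂ _ ih

theorem pvAdded_keys_not_in {t : List (String × Option String)} {L : List (String × String)} {x : String}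
    (h : x ∈ (pvAdded t L).map Prod.fst) : L.any (fun p => p.1 == x) = false := by
  rw [List.mem_map] at h
  rcases h with ⟨r, hr, hx⟩
  rcases List.mem_filterMap.mp hr with ⟨q, _, hf⟩
  cases hv : q.2 with
  | none => rw [hv] at hf; simp at hf
  | some w =>
    rw [hv] at hf
    by_cases hcon : L.any (fun p => p.1 == q.1) = true
    · simp [hcon] at hf
    · have hcon' : L.any (fun p => p.1 == q.1) = false := Bool.eq_false_iff.mpr hcon
      rw [hcon'] at hf
      norm_num at hf
      have hxq : x = q.1 := by rw [← hx, ← hf]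
      rw [hxq]
      exact hcon'

-- ===== VERDICT (by name: the statement is the Claim_ definition above) =====
theorem merge_custom_fields_spec : Claim_equal_merge_custom_fields := by
  intro existing incoming _ hpre
  obtain ⟨hex, hinc⟩ := hpre
  unfold Spec_merge_custom_fields merge_custom_fields merge_custom_fields_alt
  have hexi : (PySem.Dict.ofList existing).items = existing := pvOfList_items existing hex
  have hinci : (PySem.Dict.ofList incoming).items = incoming := pvOfList_items incoming hinc
  -- identify B's two passes with pvJoin / pvAdded
  have hkept : existing.filterMap (fun p =>
      match (PySem.Dict.ofList incoming).get? p.1 with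
      | none => some p
      | some none => none
      | some (some w) => some (p.1, w)) = pvJoin incoming existing := by
    unfold pvJoin
    apply List.filterMap_congr
    intro p _
    simp [PySem.Dict.get?, hinci, pvSel, pvLook]
  have hadded : incoming.filterMap (fun q =>
      match q.2 with
      | none => none
      | some w => if (PySem.Dict.ofList existing).contains q.1 then none else some (q.1, w)) =
      pvAdded incoming existing := by
    unfold pvAdded
    apply List.filterMap_congr
    intro q _
    simp only [PySem.Dict.contains, hexi]
  simp only [hkept, hadded]
  -- the result keys are nodup, so the final dict build is the identity
  have hjk : ((pvJoin incoming existing).map Prod.fst).Nodup :=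
    hex.sublist (pvJoin_keys_sublist incoming existing)
  have hak : ((pvAdded incoming existing).map Prod.fst).Nodup :=
    hinc.sublist (pvAdded_keys_sublist incoming existing)
  have hnd : (((pvJoin incoming existing) ++ (pvAdded incoming existing)).map Prod.fst).Nodup := by
    rw [List.map_append, List.nodup_append]
    refine ⟨hjk, hak, ?_⟩
    intro x hx y hy hxy
    subst hxy
    have h2 := pvAdded_keys_not_in hy
    rw [List.any_eq_false] at h2
    rcases List.mem_map.mp ((pvJoin_keys_sublist incoming existing).mem hx) with ⟨p, hp, hpx⟩
    exact absurd (by simp [hpx]) (h2 p hp)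
  rw [pvOfList_items _ hnd]
  rw [pvLoop incoming (PySem.Dict.ofList existing) hinc, hexi]
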